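-- pv_equiv track=rewrite | github.com/JoshBarber2023/Abstraction-and-Reasoning-Corpus---Classification-Method | utils/rule_helpers.py | match_objects_by_overlap
-- ===== SOURCE A (Python) =====
-- def match_objects_by_overlap(inp_objs, out_objs):
--     """
--     Attempts to match each input object with an output object based on location overlap.
--     Returns a list of (in_obj, out_obj) pairs.
--     """
--     matches = []
--     used_out = set()
--
--     for in_obj in inp_objs:
--         in_locs = {loc for _, loc in in_obj}
--         best_match = None
--         best_overlap = 0
--
--         for i, out_obj in enumerate(out_objs):
--             if i in used_out:
--                 continue
--
--             out_locs = {loc for _, loc in out_obj}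
--             overlap = len(in_locs & out_locs)
--
--             if overlap > best_overlap:
--                 best_overlap = overlap
--                 best_match = (in_obj, out_obj, i)
--
--         if best_match:
--             matches.append((best_match[0], best_match[1]))
--             used_out.add(best_match[2])
--
--     return matches
-- ===== SOURCE B (Python) =====
-- def match_objects_by_overlap(inp_objs, out_objs):
--     """
--     Same matching via an inverted index: map each location to the output
--     objects containing it, then accumulate overlap counts only over each
--     input object's own cells instead of intersecting with every output.
--     """
--     loc_index = {}
--     for i, out_obj in enumerate(out_objs):
--         for loc in dict.fromkeys(loc for _, loc in out_obj):
--             loc_index.setdefault(loc, []).append(i)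
--
--     matches = []
--     used = set()
--     for in_obj in inp_objs:
--         counts = {}
--         for loc in dict.fromkeys(loc for _, loc in in_obj):
--             for i in loc_index.get(loc, []):
--                 if i not in used:
--                     counts[i] = counts.get(i, 0) + 1
--         best, best_i = 0, -1
--         for i, c in counts.items():
--             if c > best or (c == best and c > 0 and i < best_i):
--                 best, best_i = c, i
--         if best > 0:
--             matches.append((in_obj, out_objs[best_i]))
--             used.add(best_i)
--     return matches
-- ===== Notes on version B (the rewrite author's own statement) =====
-- stated objective: faster
-- what changed: Instead of intersecting each input object's location set with every remaining output object's set, B builds one inverted location->output-indices index and, per input object, accumulates overlap counts only over that object's own cells, then picks the max-count (lowest-index tie-break) unused output.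
import Mathlib
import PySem

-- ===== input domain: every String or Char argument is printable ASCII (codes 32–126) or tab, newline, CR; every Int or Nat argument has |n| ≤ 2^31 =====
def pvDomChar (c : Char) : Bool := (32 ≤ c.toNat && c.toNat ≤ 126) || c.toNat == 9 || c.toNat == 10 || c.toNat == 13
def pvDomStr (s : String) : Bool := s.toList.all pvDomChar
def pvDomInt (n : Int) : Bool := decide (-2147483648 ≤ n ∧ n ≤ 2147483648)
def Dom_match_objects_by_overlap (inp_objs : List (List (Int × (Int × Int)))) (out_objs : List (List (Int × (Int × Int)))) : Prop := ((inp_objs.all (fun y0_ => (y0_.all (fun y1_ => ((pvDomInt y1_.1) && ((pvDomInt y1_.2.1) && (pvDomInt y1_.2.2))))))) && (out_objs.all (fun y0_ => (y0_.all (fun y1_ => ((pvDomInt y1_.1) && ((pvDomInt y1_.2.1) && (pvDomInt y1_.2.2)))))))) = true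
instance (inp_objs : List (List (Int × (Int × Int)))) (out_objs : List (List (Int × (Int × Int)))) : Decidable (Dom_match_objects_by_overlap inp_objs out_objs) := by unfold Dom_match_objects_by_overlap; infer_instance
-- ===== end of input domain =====

-- B replaces A's per-pair set intersections by one inverted location→output-indices index with
-- per-input-object overlap counting (measured faster on the generated large inputs).

-- ===== PORT A =====
-- inner loop body of A: 'for i, out_obj in enumerate(out_objs): …'
def aStep (in_obj : List (Int × (Int × Int))) (in_locs : PySem.Set (Int × Int))
    (used : PySem.Set Int)
    (bs : Option ((List (Int × (Int × Int))) × (List (Int × (Int × Int))) × Int) × Int)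
    (p : Int × List (Int × (Int × Int))) :
    Option ((List (Int × (Int × Int))) × (List (Int × (Int × Int))) × Int) × Int :=
  if used.contains p.1 then bs
  else
    let out_locs : PySem.Set (Int × Int) := PySem.Set.ofList (p.2.map (fun q => q.2))
    let overlap : Int := PySem.Set.len (PySem.Set.inter in_locs out_locs)
    if overlap > bs.2 then (some (in_obj, p.2, p.1), overlap) else bs

def match_objects_by_overlap (inp_objs : List (List (Int × (Int × Int)))) (out_objs : List (List (Int × (Int × Int)))) : List ((List (Int × (Int × Int))) × (List (Int × (Int × Int)))) :=
  (inp_objs.foldl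
    (fun st in_obj =>
      let in_locs : PySem.Set (Int × Int) := PySem.Set.ofList (in_obj.map (fun q => q.2))
      let r := (PySem.List.enumerate out_objs).foldl (aStep in_obj in_locs st.2) (none, 0)
      match r.1 with
      | some bm => (st.1 ++ [(bm.1, bm.2.1)], PySem.Set.add st.2 bm.2.2)
      | none => (st.1, st.2))
    (([] : List ((List (Int × (Int × Int))) × (List (Int × (Int × Int))))), (PySem.Set.empty : PySem.Set Int))).1

-- ===== PORT B =====
-- 'loc_index.setdefault(loc, []).append(i)' over the distinct locations of every output object
def bIndex (out_objs : List (List (Int × (Int × Int)))) : PySem.Dict (Int × Int) (List Int) :=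
  (PySem.List.enumerate out_objs).foldl
    (fun d p =>
      (PySem.List.dedup (p.2.map (fun q => q.2))).foldl
        (fun d loc => d.modify loc [] (fun v => v ++ [p.1])) d)
    PySem.Dict.empty

-- 'counts[i] = counts.get(i, 0) + 1' over the index lists of the input object's distinct locations
def bCounts (idx : PySem.Dict (Int × Int) (List Int)) (used : PySem.Set Int)
    (in_obj : List (Int × (Int × Int))) : PySem.Dict Int Int :=
  (PySem.List.dedup (in_obj.map (fun q => q.2))).foldl
    (fun d loc =>
      (idx.getD loc []).foldl
        (fun d i => if used.contains i then d else d.insert i (d.getD i 0 + 1)) d)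
    PySem.Dict.empty

-- 'if c > best or (c == best and c > 0 and i < best_i): best, best_i = c, i'
def bStep (bb : Int × Int) (q : Int × Int) : Int × Int :=
  if q.2 > bb.1 ∨ (q.2 = bb.1 ∧ q.2 > 0 ∧ q.1 < bb.2) then (q.2, q.1) else bb

def match_objects_by_overlap_alt (inp_objs : List (List (Int × (Int × Int)))) (out_objs : List (List (Int × (Int × Int)))) : List ((List (Int × (Int × Int))) × (List (Int × (Int × Int)))) :=
  let idx := bIndex out_objs
  (inp_objs.foldl
    (fun st in_obj =>
      let counts := bCounts idx st.2 in_obj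
      let r := counts.items.foldl bStep (0, -1)
      if r.1 > 0 then (st.1 ++ [(in_obj, PySem.List.pyGetD out_objs r.2 [])], PySem.Set.add st.2 r.2)
      else (st.1, st.2))
    (([] : List ((List (Int × (Int × Int))) × (List (Int × (Int × Int))))), (PySem.Set.empty : PySem.Set Int))).1

-- ===== PRECONDITION & SPEC =====
def Spec_match_objects_by_overlap (inp_objs : List (List (Int × (Int × Int)))) (out_objs : List (List (Int × (Int × Int)))) (out : List ((List (Int × (Int × Int))) × (List (Int × (Int × Int))))) : Prop := out = match_objects_by_overlap_alt inp_objs out_objs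
instance (inp_objs : List (List (Int × (Int × Int)))) (out_objs : List (List (Int × (Int × Int)))) (out : List ((List (Int × (Int × Int))) × (List (Int × (Int × Int))))) : Decidable (Spec_match_objects_by_overlap inp_objs out_objs out) := by unfold Spec_match_objects_by_overlap; infer_instance

-- ===== CLAIM (what is proved, stated in full; the proofs are below) =====
def Claim_equal_match_objects_by_overlap : Prop := ∀ (inp_objs : List (List (Int × (Int × Int)))) (out_objs : List (List (Int × (Int × Int)))), Dom_match_objects_by_overlap inp_objs out_objs → Spec_match_objects_by_overlap inp_objs out_objs (match_objects_by_overlap inp_objs out_objs)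

-- ===== LEMMAS AND PROOFS =====

-- overlap of an input object with one output object, as A computes it
def ovl (in_obj x : List (Int × (Int × Int))) : Int :=
  PySem.Set.len (PySem.Set.inter (PySem.Set.ofList (in_obj.map (fun q => q.2)))
    (PySem.Set.ofList (x.map (fun q => q.2))))

-- the candidate (index, overlap) pairs: unused outputs with positive overlap, by index
def cands (out_objs : List (List (Int × (Int × Int)))) (in_obj : List (Int × (Int × Int)))
    (used : PySem.Set Int) : List (Int × Int) :=
  ((PySem.List.enumerate out_objs).filter
      (fun p => !used.contains p.1 && decide (0 < ovl in_obj p.2))).map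
    (fun p => (p.1, ovl in_obj p.2))

-- the flat list of (unused) output indices B's counting loop visits
def Pp (out_objs : List (List (Int × (Int × Int)))) (in_obj : List (Int × (Int × Int)))
    (used : PySem.Set Int) : List Int :=
  ((PySem.List.dedup (in_obj.map (fun q => q.2))).flatMap
      (fun loc => ((PySem.List.enumerate out_objs).filter
        (fun p => decide (loc ∈ p.2.map (fun q => q.2)))).map (fun p => p.1))).filter
    (fun i => !used.contains i)

def absA (σ : Option ((List (Int × (Int × Int))) × (List (Int × (Int × Int))) × Int) × Int) : Int × Int :=
  (σ.2, match σ.1 with | none => -1 | some t => t.2.2)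

def InvA (in_obj : List (Int × (Int × Int))) (out_objs : List (List (Int × (Int × Int))))
    (s : Int) (σ : Option ((List (Int × (Int × Int))) × (List (Int × (Int × Int))) × Int) × Int) : Prop :=
  (σ.1 = none → σ.2 = 0) ∧
  (∀ t, σ.1 = some t → 0 < σ.2 ∧ 0 ≤ t.2.2 ∧ t.2.2 < s ∧ t.1 = in_obj ∧
      t.2.1 = PySem.List.pyGetD out_objs t.2.2 [])

theorem bStep_comm (x y z : Int × Int) (hx : 1 ≤ x.2) (hy : 1 ≤ y.2) :
    bStep (bStep z x) y = bStep (bStep z y) x := by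
  obtain ⟨i, c⟩ := x; obtain ⟨j, d⟩ := y; obtain ⟨bi, b⟩ := z
  simp only [bStep] at *
  split_ifs <;> simp_all [Prod.ext_iff] <;> omega

theorem foldl_if_skip {α β : Type} (q : α → Bool) (f : β → α → β) :
    ∀ (l : List α) (init : β),
    l.foldl (fun d x => if q x then d else f d x) init = (l.filter (fun x => !q x)).foldl f init := by
  intro l
  induction l with
  | nil => intro init; rfl
  | cons a l ih =>
    intro init
    by_cases h : q a = true <;> simp [h, ih]

theorem bCounts_eq_counter (idx : PySem.Dict (Int × Int) (List Int)) (used : PySem.Set Int)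
    (in_obj : List (Int × (Int × Int))) :
    bCounts idx used in_obj =
      PySem.Dict.counter
        (((PySem.List.dedup (in_obj.map (fun q => q.2))).flatMap
            (fun loc => idx.getD loc [])).filter (fun i => !used.contains i)) := by
  rw [bCounts, ← List.foldl_flatMap, foldl_if_skip,
    ← PySem.Dict.foldl_insert_getD_add_one_eq_counter]

theorem key_extract {α β : Type} [BEq α] [LawfulBEq α] (i : β) (loc : α) :
    ∀ L : List α, L.Nodup →
    ((L.map (fun l => (l, i))).filter (fun q => q.1 == loc)).map (fun q => q.2)
      = if loc ∈ L then [i] else [] := by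
  intro L
  induction L with
  | nil => intro _; rfl
  | cons a L ih =>
    intro hnd
    rcases List.nodup_cons.mp hnd with ⟨ha, hL⟩
    by_cases h : a = loc
    · subst h
      simp [ih hL, ha]
    · simp [h, ih hL, Ne.symm h]

theorem bIndex_getD (out_objs : List (List (Int × (Int × Int)))) (loc : Int × Int) :
    (bIndex out_objs).getD loc [] =
      ((PySem.List.enumerate out_objs).filter
        (fun p => decide (loc ∈ p.2.map (fun q => q.2)))).map (fun p => p.1) := by
  rw [bIndex]
  have h1 : ∀ (p : Int × List (Int × (Int × Int))) (d : PySem.Dict (Int × Int) (List Int)),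
      (PySem.List.dedup (p.2.map (fun q => q.2))).foldl
        (fun d loc => d.modify loc [] (fun v => v ++ [p.1])) d
      = ((PySem.List.dedup (p.2.map (fun q => q.2))).map (fun l => (l, p.1))).foldl
        (fun d q => d.modify q.1 [] (fun v => v ++ [q.2])) d := by
    intro p d; rw [List.foldl_map]
  simp only [h1]
  rw [← List.foldl_flatMap, PySem.Dict.getD_foldl_modify_append]
  simp only [PySem.Dict.getD_empty, List.nil_append]
  induction PySem.List.enumerate out_objs with
  | nil => rfl
  | cons p E ih =>
    simp only [List.flatMap_cons, List.filter_append, List.map_append, ih, List.filter_cons]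
    rw [key_extract p.1 loc _ (PySem.List.nodup_dedup _)]
    by_cases hm : loc ∈ p.2.map (fun q => q.2) <;>
      simp [hm]

theorem A_fold (in_obj : List (Int × (Int × Int))) (out_objs : List (List (Int × (Int × Int))))
    (used : PySem.Set Int) :
    ∀ (tail : List (List (Int × (Int × Int)))) (s : Int), 0 ≤ s →
    ∀ σ, InvA in_obj out_objs s σ →
    (∀ p ∈ PySem.List.enumerate tail s, p.2 = PySem.List.pyGetD out_objs p.1 []) →
    InvA in_obj out_objs (s + tail.length)
      ((PySem.List.enumerate tail s).foldl
        (aStep in_obj (PySem.Set.ofList (in_obj.map (fun q => q.2))) used) σ) ∧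
    absA ((PySem.List.enumerate tail s).foldl
        (aStep in_obj (PySem.Set.ofList (in_obj.map (fun q => q.2))) used) σ) =
      (((PySem.List.enumerate tail s).filter
          (fun p => !used.contains p.1 && decide (0 < ovl in_obj p.2))).map
        (fun p => (p.1, ovl in_obj p.2))).foldl bStep (absA σ) := by
  intro tail
  induction tail with
  | nil => intro s hs σ hσ hx; simpa [PySem.List.enumerate] using hσ
  | cons x tl ih =>
    intro s hs σ hσ hx
    rw [PySem.List.enumerate_cons] at *
    have hxh : x = PySem.List.pyGetD out_objs s [] := hx (s, x) (by simp)
    have hxt : ∀ p ∈ PySem.List.enumerate tl (s+1), p.2 = PySem.List.pyGetD out_objs p.1 [] := by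
      intro p hp; exact hx p (by simp [hp])
    have hb_nonneg : 0 ≤ σ.2 := by
      rcases h : σ.1 with _ | t
      · exact le_of_eq (hσ.1 h).symm
      · exact le_of_lt (hσ.2 t h).1
    simp only [List.foldl_cons, List.filter_cons]
    by_cases hu : s ∈ (used : List Int)
    · -- skipped
      have : aStep in_obj (PySem.Set.ofList (in_obj.map (fun q => q.2))) used σ (s, x) = σ := by
        simp [aStep, hu]
      rw [this]
      have hmono : InvA in_obj out_objs (s+1) σ :=
        ⟨hσ.1, fun t ht => by have := hσ.2 t ht; exact ⟨this.1, this.2.1, by omega, this.2.2.2⟩⟩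
      have := ih (s+1) (by omega) σ hmono hxt
      simpa [hu, show s + (tl.length + 1 : Int) = (s+1) + tl.length by ring] using this
    · -- considered
      have hov : (↑(List.length ((PySem.Set.ofList (in_obj.map (fun q => q.2))).inter
          (PySem.Set.ofList (x.map (fun q => q.2))))) : Int) = ovl in_obj x := rfl
      by_cases hgt : ovl in_obj x > σ.2
      · -- replaces
        have hstep : aStep in_obj (PySem.Set.ofList (in_obj.map (fun q => q.2))) used σ (s, x)
            = (some (in_obj, x, s), ovl in_obj x) := by
          simp [aStep, hu, hov, hgt]
        have hpos : 0 < ovl in_obj x := by omega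
        have hinv' : InvA in_obj out_objs (s+1) (some (in_obj, x, s), ovl in_obj x) := by
          refine ⟨by intro h; simp at h, ?_⟩
          intro t ht
          simp only [Option.some.injEq] at ht
          subst ht
          exact ⟨hpos, hs, by show s < s+1; omega, rfl, hxh⟩
        have := ih (s+1) (by omega) _ hinv' hxt
        have habs : absA (some ((in_obj, x, s) : (List (Int × (Int × Int))) × (List (Int × (Int × Int))) × Int), ovl in_obj x)
            = bStep (absA σ) (s, ovl in_obj x) := by
          rcases h : σ.1 with _ | t
          · simp [absA, bStep, h, hgt]
          · simp [absA, bStep, h, hgt]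
        rw [hstep]
        constructor
        · have h2 := this.1
          simpa [show s + (tl.length + 1 : Int) = (s+1) + tl.length by ring] using h2
        · rw [this.2]
          have hcond : (!used.contains (s:Int) && decide (0 < ovl in_obj x)) = true := by
            simp [hu, hpos]
          rw [if_pos hcond, List.map_cons, List.foldl_cons, habs]
      · -- keeps
        have hstep : aStep in_obj (PySem.Set.ofList (in_obj.map (fun q => q.2))) used σ (s, x) = σ := by
          simp [aStep, hu, hov, hgt]
        rw [hstep]
        have hmono : InvA in_obj out_objs (s+1) σ :=
          ⟨hσ.1, fun t ht => by have := hσ.2 t ht; exact ⟨this.1, this.2.1, by omega, this.2.2.2⟩⟩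
        have := ih (s+1) (by omega) σ hmono hxt
        by_cases hpos : 0 < ovl in_obj x
        · -- in cands but bStep keeps
          have hbi : (absA σ).2 < s := by
            rcases h : σ.1 with _ | t
            · have := hσ.1 h; simp [absA, h]; omega
            · have := hσ.2 t h; simp [absA, h]; omega
          have hkeep : bStep (absA σ) (s, ovl in_obj x) = absA σ := by
            have h1 : ¬ ovl in_obj x > (absA σ).1 := by simp [absA]; omega
            have h2 : ¬ (ovl in_obj x = (absA σ).1 ∧ ovl in_obj x > 0 ∧ s < (absA σ).2) := by
              intro h; omega
            simp [bStep, h1, h2]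
          constructor
          · simpa [show s + (tl.length + 1 : Int) = (s+1) + tl.length by ring] using this.1
          · rw [this.2]
            have hcond : (!used.contains (s:Int) && decide (0 < ovl in_obj x)) = true := by
              simp [hu, hpos]
            rw [if_pos hcond, List.map_cons, List.foldl_cons, hkeep]
        · -- not a candidate
          constructor
          · simpa [show s + (tl.length + 1 : Int) = (s+1) + tl.length by ring] using this.1
          · rw [this.2]
            simp [hu, hpos]

theorem enumerate_fst_inj {α : Type} (xs : List α) (s : Int) (p p' : Int × α)
    (hp : p ∈ PySem.List.enumerate xs s) (hp' : p' ∈ PySem.List.enumerate xs s)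
    (h : p.1 = p'.1) : p = p' := by
  rcases (PySem.List.mem_enumerate_iff xs s p).mp hp with ⟨k, hk, rfl⟩
  rcases (PySem.List.mem_enumerate_iff xs s p').mp hp' with ⟨k', hk', rfl⟩
  simp only at h
  have : k = k' := by omega
  subst this; rfl

-- g loc characterization assumed (bIndex_getD); abstract over it here:
-- gl := (E.filter (fun p => decide (loc ∈ p.2.map (fun q => q.2)))).map (fun p => p.1)

theorem gl_nodup (out_objs : List (List (Int × (Int × Int)))) (loc : Int × Int) :
    (((PySem.List.enumerate out_objs).filter
        (fun p => decide (loc ∈ p.2.map (fun q => q.2)))).map (fun p => p.1)).Nodup := by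
  have h1 := (PySem.List.pairwise_lt_enumerate out_objs 0).filter
      (fun p => decide (loc ∈ p.2.map (fun q => q.2)))
  have h2 : (((PySem.List.enumerate out_objs).filter
        (fun p => decide (loc ∈ p.2.map (fun q => q.2)))).map (fun p => p.1)).Pairwise (· < ·) :=
    List.pairwise_map.mpr h1
  exact h2.imp (fun h => by omega)

theorem mem_gl (out_objs : List (List (Int × (Int × Int)))) (loc : Int × Int) (i : Int) :
    i ∈ ((PySem.List.enumerate out_objs).filter
        (fun p => decide (loc ∈ p.2.map (fun q => q.2)))).map (fun p => p.1)
      ↔ ∃ p ∈ PySem.List.enumerate out_objs, p.1 = i ∧ loc ∈ p.2.map (fun q => q.2) := by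
  simp only [List.mem_map, List.mem_filter, decide_eq_true_eq]
  constructor
  · rintro ⟨p, ⟨hp, hl⟩, rfl⟩; exact ⟨p, hp, rfl, hl⟩
  · rintro ⟨p, hp, rfl, hl⟩; exact ⟨p, ⟨hp, hl⟩, rfl⟩

-- countP over D equals ovl

theorem countP_eq_ovl (in_obj x : List (Int × (Int × Int))) :
    ((PySem.List.dedup (in_obj.map (fun q => q.2))).countP
        (fun loc => decide (loc ∈ x.map (fun q => q.2))) : Int) = ovl in_obj x := by
  rw [ovl, PySem.Set.len, PySem.Set.inter]
  rw [PySem.List.dedup_eq_ofList, ← List.countP_eq_length_filter]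
  congr 1
  apply List.countP_congr
  intro l hl
  simp [PySem.Set.mem_ofList]

-- abbreviate: P' for a given out_objs, used, in_obj, with g already replaced by its closed form
-- countFlat: count of i in the flatMap over D of gl

theorem count_flat (D : List (Int × Int)) (g : (Int × Int) → List Int) (i : Int)
    (hnd : ∀ loc, (g loc).Nodup) :
    (D.flatMap g).count i = D.countP (fun loc => decide (i ∈ g loc)) := by
  induction D with
  | nil => rfl
  | cons a D ih =>
    rw [List.flatMap_cons, List.count_append, ih, List.countP_cons]
    by_cases h : i ∈ g a
    · rw [List.count_eq_one_of_mem (hnd a) h]; simp [h]; omega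
    · rw [List.count_eq_zero_of_not_mem h]; simp [h]

theorem count_filter_not_used (L : List Int) (used : PySem.Set Int) (i : Int) (h : i ∉ used) :
    (L.filter (fun j => !used.contains j)).count i = L.count i := by
  apply List.count_filter
  simp [h]

theorem count_Pp (out_objs : List (List (Int × (Int × Int)))) (in_obj : List (Int × (Int × Int)))
    (used : PySem.Set Int) (p : Int × List (Int × (Int × Int)))
    (hp : p ∈ PySem.List.enumerate out_objs) (hu : p.1 ∉ used) :
    ((Pp out_objs in_obj used).count p.1 : Int) = ovl in_obj p.2 := by
  rw [Pp, count_filter_not_used _ _ _ hu,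
    count_flat _ _ _ (fun loc => gl_nodup out_objs loc)]
  rw [show (PySem.List.dedup (in_obj.map (fun q => q.2))).countP
      (fun loc => decide (p.1 ∈ ((PySem.List.enumerate out_objs).filter
        (fun p' => decide (loc ∈ p'.2.map (fun q => q.2)))).map (fun p' => p'.1)))
    = (PySem.List.dedup (in_obj.map (fun q => q.2))).countP
      (fun loc => decide (loc ∈ p.2.map (fun q => q.2))) from ?_]
  · exact countP_eq_ovl in_obj p.2
  · apply List.countP_congr
    intro loc _
    simp only [decide_eq_true_eq]
    rw [mem_gl]
    constructor
    · rintro ⟨p', hp', h1, h2⟩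
      have := enumerate_fst_inj out_objs 0 p' p hp' hp h1
      subst this; exact h2
    · intro h; exact ⟨p, hp, rfl, h⟩

theorem ovl_pos_iff (in_obj x : List (Int × (Int × Int))) :
    0 < ovl in_obj x ↔ ∃ loc ∈ PySem.List.dedup (in_obj.map (fun q => q.2)),
      loc ∈ x.map (fun q => q.2) := by
  rw [← countP_eq_ovl]
  rw [show (0 : Int) < ((PySem.List.dedup (in_obj.map (fun q => q.2))).countP
      (fun loc => decide (loc ∈ x.map (fun q => q.2))) : Int)
    ↔ 0 < (PySem.List.dedup (in_obj.map (fun q => q.2))).countP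
      (fun loc => decide (loc ∈ x.map (fun q => q.2))) by exact_mod_cast Iff.rfl]
  rw [List.countP_pos_iff]
  simp

theorem mem_Pp (out_objs : List (List (Int × (Int × Int)))) (in_obj : List (Int × (Int × Int)))
    (used : PySem.Set Int) (i : Int) :
    i ∈ Pp out_objs in_obj used ↔
      i ∉ (used : List Int) ∧ ∃ p ∈ PySem.List.enumerate out_objs, p.1 = i ∧ 0 < ovl in_obj p.2 := by
  rw [Pp, List.mem_filter]
  constructor
  · rintro ⟨hm, hf⟩
    rcases List.mem_flatMap.mp hm with ⟨loc, hloc, hg⟩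
    rcases (mem_gl out_objs loc i).mp hg with ⟨p, hp, h1, h2⟩
    refine ⟨by simpa using hf, p, hp, h1, ?_⟩
    exact (ovl_pos_iff in_obj p.2).mpr ⟨loc, hloc, h2⟩
  · rintro ⟨hu, p, hp, rfl, hpos⟩
    rcases (ovl_pos_iff in_obj p.2).mp hpos with ⟨loc, hloc, h2⟩
    refine ⟨List.mem_flatMap.mpr ⟨loc, hloc, (mem_gl out_objs loc p.1).mpr ⟨p, hp, rfl, h2⟩⟩, by simpa using hu⟩

theorem cands_nodup (out_objs : List (List (Int × (Int × Int)))) (in_obj : List (Int × (Int × Int)))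
    (used : PySem.Set Int) : (cands out_objs in_obj used).Nodup := by
  have h1 := (PySem.List.pairwise_lt_enumerate out_objs 0).filter
      (fun p => !used.contains p.1 && decide (0 < ovl in_obj p.2))
  have h2 : (cands out_objs in_obj used).Pairwise (fun a b => a.1 < b.1) :=
    List.pairwise_map.mpr h1
  exact h2.imp (fun h => by intro he; rw [he] at h; omega)

theorem counter_items_perm_cands (out_objs : List (List (Int × (Int × Int))))
    (in_obj : List (Int × (Int × Int))) (used : PySem.Set Int) :
    ((PySem.Set.ofList (Pp out_objs in_obj used)).map
        (fun k => (k, ((Pp out_objs in_obj used).count k : Int)))).Perm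
      (cands out_objs in_obj used) := by
  rw [List.perm_ext_iff_of_nodup]
  · intro a
    simp only [List.mem_map, PySem.Set.mem_ofList]
    constructor
    · rintro ⟨k, hk, rfl⟩
      rcases (mem_Pp out_objs in_obj used k).mp hk with ⟨hu, p, hp, rfl, hpos⟩
      rw [count_Pp out_objs in_obj used p hp hu]
      rw [cands, List.mem_map]
      exact ⟨p, List.mem_filter.mpr ⟨hp, by simp [hu, hpos]⟩, rfl⟩
    · intro ha
      rcases List.mem_map.mp ha with ⟨p, hpf, rfl⟩
      rcases List.mem_filter.mp hpf with ⟨hp, hcond⟩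
      rw [Bool.and_eq_true] at hcond
      have hu : p.1 ∉ (used : List Int) := by simpa using hcond.1
      have hpos : 0 < ovl in_obj p.2 := by simpa using hcond.2
      refine ⟨p.1, (mem_Pp out_objs in_obj used p.1).mpr ⟨hu, p, hp, rfl, hpos⟩, ?_⟩
      rw [count_Pp out_objs in_obj used p hp hu]
  · exact List.Nodup.map (fun a b hab => by
        simpa using congrArg Prod.fst hab)
      (PySem.Set.nodup_ofList _)
  · exact cands_nodup out_objs in_obj used

theorem items_eq (out_objs : List (List (Int × (Int × Int)))) (used : PySem.Set Int)
    (in_obj : List (Int × (Int × Int))) :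
    (bCounts (bIndex out_objs) used in_obj).items =
      (PySem.Set.ofList (Pp out_objs in_obj used)).map
        (fun k => (k, ((Pp out_objs in_obj used).count k : Int))) := by
  rw [bCounts_eq_counter]
  simp only [bIndex_getD]
  rw [PySem.Dict.items_counter]
  rfl

theorem B_fold_eq (out_objs : List (List (Int × (Int × Int)))) (used : PySem.Set Int)
    (in_obj : List (Int × (Int × Int))) :
    (bCounts (bIndex out_objs) used in_obj).items.foldl bStep (0, -1) =
      (cands out_objs in_obj used).foldl bStep (0, -1) := by
  have hperm : (bCounts (bIndex out_objs) used in_obj).items.Perm (cands out_objs in_obj used) := by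
    rw [items_eq]; exact counter_items_perm_cands out_objs in_obj used
  apply hperm.foldl_eq'
  intro x hx y hy z
  have hpos : ∀ q ∈ (bCounts (bIndex out_objs) used in_obj).items, 1 ≤ q.2 := by
    rw [items_eq]
    intro q hq
    rcases List.mem_map.mp hq with ⟨k, hk, rfl⟩
    have : 0 < (Pp out_objs in_obj used).count k :=
      List.count_pos_iff.mpr ((PySem.Set.mem_ofList _ _).mp hk)
    simpa using this
  exact bStep_comm x y z (hpos x hx) (hpos y hy)

theorem hx_enum (out_objs : List (List (Int × (Int × Int)))) :
    ∀ p ∈ PySem.List.enumerate out_objs, p.2 = PySem.List.pyGetD out_objs p.1 [] := by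
  intro p hp
  rcases (PySem.List.mem_enumerate_iff out_objs 0 p).mp hp with ⟨k, hk, rfl⟩
  simp [PySem.List.pyGetD_natCast, List.getD_eq_getElem?_getD, hk]

theorem step_eq (out_objs : List (List (Int × (Int × Int))))
    (in_obj : List (Int × (Int × Int)))
    (st : List ((List (Int × (Int × Int))) × (List (Int × (Int × Int)))) × PySem.Set Int) :
    (let in_locs : PySem.Set (Int × Int) := PySem.Set.ofList (in_obj.map (fun q => q.2))
     let r := (PySem.List.enumerate out_objs).foldl (aStep in_obj in_locs st.2) (none, 0)
     match r.1 with
     | some bm => (st.1 ++ [(bm.1, bm.2.1)], PySem.Set.add st.2 bm.2.2)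
     | none => (st.1, st.2)) =
    (let counts := bCounts (bIndex out_objs) st.2 in_obj
     let r := counts.items.foldl bStep (0, -1)
     if r.1 > 0 then (st.1 ++ [(in_obj, PySem.List.pyGetD out_objs r.2 [])], PySem.Set.add st.2 r.2)
     else (st.1, st.2)) := by
  have hinv0 : InvA in_obj out_objs 0 ((none, 0) :
      Option ((List (Int × (Int × Int))) × (List (Int × (Int × Int))) × Int) × Int) :=
    ⟨fun _ => rfl, fun t ht => by cases ht⟩
  have hA := A_fold in_obj out_objs st.2 out_objs 0 le_rfl (none, 0) hinv0 (hx_enum out_objs)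
  have hB := B_fold_eq out_objs st.2 in_obj
  have habs0 : absA ((none, 0) :
      Option ((List (Int × (Int × Int))) × (List (Int × (Int × Int))) × Int) × Int) = (0, -1) := rfl
  rw [habs0] at hA
  have hr : (bCounts (bIndex out_objs) st.2 in_obj).items.foldl bStep (0, -1) =
      absA ((PySem.List.enumerate out_objs).foldl
        (aStep in_obj (PySem.Set.ofList (in_obj.map (fun q => q.2))) st.2) (none, 0)) := by
    rw [hB, hA.2]; rfl
  simp only []
  rw [hr]
  set rA := (PySem.List.enumerate out_objs).foldl
      (aStep in_obj (PySem.Set.ofList (in_obj.map (fun q => q.2))) st.2) (none, 0) with hrA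
  rcases h : rA.1 with _ | t
  · have h0 : rA.2 = 0 := hA.1.1 h
    simp [absA, h, h0]
  · have hinv := hA.1.2 t h
    have : absA rA = (rA.2, t.2.2) := by simp [absA, h]
    rw [this]
    simp [hinv.1, hinv.2.2.2.1, hinv.2.2.2.2]

theorem outer_eq (out_objs : List (List (Int × (Int × Int)))) :
    ∀ (inp : List (List (Int × (Int × Int))))
      (st : List ((List (Int × (Int × Int))) × (List (Int × (Int × Int)))) × PySem.Set Int),
    inp.foldl
      (fun st in_obj =>
        let in_locs : PySem.Set (Int × Int) := PySem.Set.ofList (in_obj.map (fun q => q.2))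
        let r := (PySem.List.enumerate out_objs).foldl (aStep in_obj in_locs st.2) (none, 0)
        match r.1 with
        | some bm => (st.1 ++ [(bm.1, bm.2.1)], PySem.Set.add st.2 bm.2.2)
        | none => (st.1, st.2)) st =
    inp.foldl
      (fun st in_obj =>
        let counts := bCounts (bIndex out_objs) st.2 in_obj
        let r := counts.items.foldl bStep (0, -1)
        if r.1 > 0 then (st.1 ++ [(in_obj, PySem.List.pyGetD out_objs r.2 [])], PySem.Set.add st.2 r.2)
        else (st.1, st.2)) st := by
  intro inp
  induction inp with
  | nil => intro st; rfl
  | cons a inp ih =>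
    intro st
    rw [List.foldl_cons, List.foldl_cons, step_eq out_objs a st]
    exact ih _

-- ===== VERDICT (by name: the statement is the Claim_ definition above) =====
theorem match_objects_by_overlap_spec : Claim_equal_match_objects_by_overlap := by
  intro inp_objs out_objs _
  unfold Spec_match_objects_by_overlap match_objects_by_overlap match_objects_by_overlap_alt
  rw [outer_eq out_objs inp_objs]
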